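-- pv_equiv track=rewrite | github.com/LMP-dev/AdventOfCode | 2025/day_03/PuzzleB.py | find_biggest_number_and_index
-- ===== SOURCE A (Python) =====
-- def find_biggest_number_and_index(row: list[int], min_size: int) -> tuple[int, int]:
--     digit, index = None, None
--
--     if min_size == 0:
--         adapted_row = row
--     else:
--         adapted_row = row[:-min_size]
--
--     for i, num in enumerate(adapted_row):
--         if num == 9:
--             digit = num
--             index = i
--             break  # Stop at first highest possible number
--         elif digit is None:
--             digit = num
--             index = i
--         elif num > digit:
--             digit = num
--             index = i
--
--     return digit, index
-- ===== SOURCE B (Python) =====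
-- def find_biggest_number_and_index(row: list[int], min_size: int) -> tuple[int, int]:
--     prefix = row if min_size == 0 else row[:-min_size]
--     if not prefix:
--         return None, None
--     # The first 9 wins immediately in A (break), even if a larger value came
--     # earlier; otherwise the first occurrence of the maximum wins.
--     target = 9 if 9 in prefix else max(prefix)
--     return target, prefix.index(target)
-- ===== Notes on version B (the rewrite author's own statement) =====
-- stated objective: idiomatic
-- what changed: A's fused accumulator loop with break is replaced by a closed form over the prefix: pick 9 if present else max(prefix), then locate it with prefix.index (first occurrence), with an explicit empty-prefix case.
import Mathlib
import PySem

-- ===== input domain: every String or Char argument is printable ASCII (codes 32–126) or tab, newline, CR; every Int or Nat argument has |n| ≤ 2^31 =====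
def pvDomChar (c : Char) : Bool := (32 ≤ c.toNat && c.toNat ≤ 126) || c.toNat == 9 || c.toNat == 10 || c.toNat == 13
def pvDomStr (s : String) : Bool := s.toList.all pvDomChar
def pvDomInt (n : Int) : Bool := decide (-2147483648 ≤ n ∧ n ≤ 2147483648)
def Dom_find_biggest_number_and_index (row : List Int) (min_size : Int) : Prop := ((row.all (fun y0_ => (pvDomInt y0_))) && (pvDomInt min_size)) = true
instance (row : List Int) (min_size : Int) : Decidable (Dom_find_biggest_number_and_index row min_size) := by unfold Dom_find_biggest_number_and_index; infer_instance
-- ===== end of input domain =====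

-- B replaces A's fused accumulator loop with a closed form (9 if present, else max; then its first index); objective: idiomatic, same cost.
-- ===== PORT A =====
-- A's for-loop with break: structural recursion carrying (digit, index) and the running position i.
def pvLoopA : Int → List Int → Option Int → Option Int → Option Int × Option Int
  | _, [], d, idx => (d, idx)
  | i, num :: rest, d, idx =>
    if num == 9 then (some num, some i)
    else match d with
      | none => pvLoopA (i + 1) rest (some num) (some i)
      | some dv =>
        if num > dv then pvLoopA (i + 1) rest (some num) (some i)
        else pvLoopA (i + 1) rest d idx

def find_biggest_number_and_index (row : List Int) (min_size : Int) : Option Int × Option Int :=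
  let adapted_row := if min_size == 0 then row else PySem.List.slice row none (some (-min_size))
  pvLoopA 0 adapted_row none none

-- ===== PORT B =====
-- Source B: `9 in prefix` → List.contains, `max(prefix)` → PySem.List.max? (the prefix is nonempty
-- here, so the `none` arm is unreachable), `prefix.index(target)` → PySem.List.index?.
def find_biggest_number_and_index_alt (row : List Int) (min_size : Int) : Option Int × Option Int :=
  let pfx := if min_size == 0 then row else PySem.List.slice row none (some (-min_size))
  if pfx = [] then (none, none)
  else
    let target : Int :=
      if pfx.contains 9 then 9
      else match PySem.List.max? pfx (fun x => x) with
        | some m => m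
        | none => 0
    (some target, (PySem.List.index? pfx target).map (fun k => (k : Int)))

-- ===== PRECONDITION & SPEC =====
def Spec_find_biggest_number_and_index (row : List Int) (min_size : Int) (out : Option Int × Option Int) : Prop := out = find_biggest_number_and_index_alt row min_size
instance (row : List Int) (min_size : Int) (out : Option Int × Option Int) : Decidable (Spec_find_biggest_number_and_index row min_size out) := by unfold Spec_find_biggest_number_and_index; infer_instance

-- ===== CLAIM (what is proved, stated in full; the proofs are below) =====
def Claim_equal_find_biggest_number_and_index : Prop := ∀ (row : List Int) (min_size : Int), Dom_find_biggest_number_and_index row min_size → Spec_find_biggest_number_and_index row min_size (find_biggest_number_and_index row min_size)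

-- ===== LEMMAS AND PROOFS =====

-- index? at a present element is the first index (List.idxOf).
lemma index?_of_mem (l : List Int) (v : Int) (h : v ∈ l) :
    PySem.List.index? l v = some (List.idxOf v l) := by
  rw [PySem.List.index?_eq_idxOf?]
  induction l with
  | nil => cases h
  | cons x t ih =>
    by_cases hx : x = v
    · subst hx; simp [List.idxOf?_cons, List.idxOf_cons_self]
    · have hm : v ∈ t := by rcases List.mem_cons.mp h with h' | h'
                            · exact absurd h'.symm hx
                            · exact h'
      simp [List.idxOf?_cons, List.idxOf_cons_ne _ hx, hx, ih hm]

-- If 9 occurs in l, A's loop returns (9, i + first index of 9).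
lemma pvLoopA_of_mem_nine (l : List Int) : ∀ (i : Int) (d idx : Option Int), 9 ∈ l →
    pvLoopA i l d idx = (some 9, some (i + (List.idxOf 9 l : Int))) := by
  induction l with
  | nil => intro _ _ _ h; cases h
  | cons num rest ih =>
    intro i d idx h
    by_cases h9 : num = 9
    · subst h9; simp [pvLoopA, List.idxOf_cons_self]
    · have hm : 9 ∈ rest := by rcases List.mem_cons.mp h with h' | h'
                               · exact absurd h'.symm h9
                               · exact h'
      have hidx : List.idxOf 9 (num :: rest) = List.idxOf 9 rest + 1 := by
        simp [List.idxOf_cons_ne _ h9]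
      cases d with
      | none =>
        rw [show pvLoopA i (num :: rest) none idx = pvLoopA (i + 1) rest (some num) (some i) by
              simp [pvLoopA, h9]]
        rw [ih _ _ _ hm, hidx]; push_cast; ring_nf
      | some dv =>
        by_cases hgt : num > dv
        · rw [show pvLoopA i (num :: rest) (some dv) idx =
                pvLoopA (i + 1) rest (some num) (some i) by simp [pvLoopA, h9, hgt]]
          rw [ih _ _ _ hm, hidx]; push_cast; ring_nf
        · rw [show pvLoopA i (num :: rest) (some dv) idx =
                pvLoopA (i + 1) rest (some dv) idx by simp [pvLoopA, h9, hgt]]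
          rw [ih _ _ _ hm, hidx]; push_cast; ring_nf

-- If 9 does not occur in l, A's loop with accumulator (b at index bi) is the running max:
-- keep (b, bi) when nothing in l exceeds b, else the overall max with its first index in l.
lemma pvLoopA_no_nine (l : List Int) : ∀ (i b : Int) (bi : Option Int), 9 ∉ l →
    pvLoopA i l (some b) bi =
      if l.foldl max b = b then (some b, bi)
      else (some (l.foldl max b), some (i + (List.idxOf (l.foldl max b) l : Int))) := by
  induction l with
  | nil => intro i b bi _; simp [pvLoopA]
  | cons num rest ih =>
    intro i b bi h
    have h9 : num ≠ 9 := fun hc => h (by simp [hc])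
    have hrest : 9 ∉ rest := fun hc => h (by simp [hc])
    have hge' : num ≤ rest.foldl max num := (PySem.List.le_foldl_max rest num).1
    by_cases hgt : num > b
    · have hmax : max b num = num := by omega
      rw [show pvLoopA i (num :: rest) (some b) bi =
            pvLoopA (i + 1) rest (some num) (some i) by simp [pvLoopA, h9, hgt]]
      rw [ih _ _ _ hrest]
      have hfold : (num :: rest).foldl max b = rest.foldl max num := by
        simp [List.foldl_cons, hmax]
      by_cases he : rest.foldl max num = num
      · rw [if_pos he, hfold, he, if_neg (by omega : ¬ (num = b))]
        simp [List.idxOf_cons_self]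
      · have hM : b < rest.foldl max num := by omega
        rw [if_neg he, hfold, if_neg (by omega : ¬ (rest.foldl max num = b))]
        have hne : num ≠ rest.foldl max num := fun hc => he hc.symm
        rw [List.idxOf_cons_ne _ hne]
        simp only [Prod.mk.injEq, true_and, Option.some.injEq, Nat.succ_eq_add_one]
        push_cast; ring
    · have hmax : max b num = b := by omega
      rw [show pvLoopA i (num :: rest) (some b) bi =
            pvLoopA (i + 1) rest (some b) bi by simp [pvLoopA, h9, hgt]]
      rw [ih _ _ _ hrest]
      have hfold : (num :: rest).foldl max b = rest.foldl max b := by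
        simp [List.foldl_cons, hmax]
      by_cases he : rest.foldl max b = b
      · rw [if_pos he, hfold, if_pos he]
      · have hble : b ≤ rest.foldl max b := (PySem.List.le_foldl_max rest b).1
        have hM : b < rest.foldl max b := lt_of_le_of_ne hble (fun hc => he hc.symm)
        rw [if_neg he, hfold, if_neg he]
        have hne : num ≠ rest.foldl max b := by omega
        rw [List.idxOf_cons_ne _ hne]
        simp only [Prod.mk.injEq, true_and, Option.some.injEq, Nat.succ_eq_add_one]
        push_cast; ring

-- The agreement on an arbitrary prefix list.
lemma loopA_eq_closed (pfx : List Int) :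
    pvLoopA 0 pfx none none =
      (if pfx = [] then ((none : Option Int), (none : Option Int))
       else
         let target : Int :=
           if pfx.contains 9 then 9
           else match PySem.List.max? pfx (fun x => x) with
             | some m => m
             | none => 0
         (some target, (PySem.List.index? pfx target).map (fun k => (k : Int)))) := by
  cases pfx with
  | nil => simp [pvLoopA]
  | cons x t =>
    simp only [List.cons_ne_nil, if_false]
    by_cases h9 : 9 ∈ (x :: t)
    · have hc : (x :: t).contains 9 = true := by
        simpa [List.contains_iff_mem] using h9
      rw [pvLoopA_of_mem_nine _ _ _ _ h9]
      simp only [hc, if_pos, index?_of_mem _ _ h9]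
      norm_num
    · have hc : (x :: t).contains 9 = false := by
        simpa using h9
      have hx9 : x ≠ 9 := fun hcx => h9 (by simp [hcx])
      have ht9 : 9 ∉ t := fun hct => h9 (by simp [hct])
      rw [show pvLoopA 0 (x :: t) none none = pvLoopA 1 t (some x) (some 0) by
            simp [pvLoopA, hx9]]
      rw [pvLoopA_no_nine _ _ _ _ ht9]
      rw [PySem.List.max?_id_cons]
      simp only [hc, Bool.false_eq_true, if_false]
      by_cases he : t.foldl max x = x
      · rw [if_pos he, he]
        have hmem : x ∈ (x :: t) := List.mem_cons_self
        rw [index?_of_mem _ _ hmem, List.idxOf_cons_self]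
        simp
      · rw [if_neg he]
        have hxle : x ≤ t.foldl max x := (PySem.List.le_foldl_max t x).1
        have hmemt : t.foldl max x ∈ t := by
          rcases PySem.List.foldl_max_mem t x with h' | h'
          · exact absurd h' he
          · exact h'
        have hmem : t.foldl max x ∈ (x :: t) := List.mem_cons_of_mem _ hmemt
        rw [index?_of_mem _ _ hmem,
            List.idxOf_cons_ne _ (fun hc' => he hc'.symm)]
        simp only [Option.bind_eq_bind, Option.bind_some,
          Option.map_some, Option.pure_def, Nat.succ_eq_add_one,
          Prod.mk.injEq, Option.some.injEq, true_and]
        push_cast; ring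

-- ===== VERDICT (by name: the statement is the Claim_ definition above) =====
theorem find_biggest_number_and_index_spec : Claim_equal_find_biggest_number_and_index := by
  intro row min_size _
  unfold Spec_find_biggest_number_and_index
  unfold find_biggest_number_and_index find_biggest_number_and_index_alt
  exact loopA_eq_closed _
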